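-- pv_equiv track=rewrite | github.com/dotrunghieu0903/OptSD | pruning/pruned.py | filter_good_captions
-- ===== SOURCE A (Python) =====
-- def filter_good_captions(caption):
--     """
--     Filter out captions that are likely to produce poor results.
--
--     Args:
--         caption: The caption to check
--
--     Returns:
--         True if the caption is good, False otherwise
--     """
--     # Skip captions that are too short
--     if len(caption.split()) < 3:
--         return False
--
--     # Skip captions with specific problematic terms
--     problematic_terms = [
--         "ferris wheel", "clock tower", "giraffe", "zebra", "kite", "tennis",
--         "skate", "ski", "skateboard", "surfboard", "baseball", "football",
--         "soccer", "basketball", "stop sign", "traffic light", "fire hydrant",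
--         "parking meter", "bench", "bird", "cat", "dog", "horse", "sheep", "cow"
--     ]
--
--     if any(term.lower() in caption.lower() for term in problematic_terms):
--         return False
--
--     return True
-- ===== SOURCE B (Python) =====
-- def filter_good_captions(caption):
--     # Skip captions that are too short
--     if len(caption.split()) < 3:
--         return False
--
--     problematic_terms = [
--         "ferris wheel", "clock tower", "giraffe", "zebra", "kite", "tennis",
--         "skate", "ski", "skateboard", "surfboard", "baseball", "football",
--         "soccer", "basketball", "stop sign", "traffic light", "fire hydrant",
--         "parking meter", "bench", "bird", "cat", "dog", "horse", "sheep", "cow"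
--     ]
--
--     # Lower the caption once, then make a single left-to-right pass over its
--     # positions: at each position check whether any problematic term starts there.
--     s = caption.lower()
--     for i in range(len(s)):
--         for term in problematic_terms:
--             if s.startswith(term, i):
--                 return False
--     return True
-- ===== Notes on version B (the rewrite author's own statement) =====
-- stated objective: alternative
-- what changed: Instead of k independent `term in caption.lower()` substring scans (re-lowering the caption for each term), B lowers the caption once and makes a single left-to-right pass over its positions, checking at each position whether any term starts there with startswith.
import Mathlib
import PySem

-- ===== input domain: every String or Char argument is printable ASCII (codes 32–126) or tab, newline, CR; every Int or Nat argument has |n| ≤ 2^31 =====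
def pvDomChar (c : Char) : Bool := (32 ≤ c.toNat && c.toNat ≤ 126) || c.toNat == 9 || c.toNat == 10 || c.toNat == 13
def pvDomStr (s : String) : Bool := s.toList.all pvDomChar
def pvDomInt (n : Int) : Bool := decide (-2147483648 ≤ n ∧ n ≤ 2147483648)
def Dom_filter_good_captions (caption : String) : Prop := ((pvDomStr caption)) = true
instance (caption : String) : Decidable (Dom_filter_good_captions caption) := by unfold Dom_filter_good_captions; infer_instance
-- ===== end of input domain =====

-- B lowers the caption once and makes a single positional pass checking each term with
-- startswith, instead of A's k independent `in` scans each re-lowering the caption (alternative, same cost).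


-- ===== PORT A =====
def pvProblematicTerms : List String :=
  ["ferris wheel", "clock tower", "giraffe", "zebra", "kite", "tennis",
   "skate", "ski", "skateboard", "surfboard", "baseball", "football",
   "soccer", "basketball", "stop sign", "traffic light", "fire hydrant",
   "parking meter", "bench", "bird", "cat", "dog", "horse", "sheep", "cow"]

def filter_good_captions (caption : String) : Bool :=
  if (PySem.Str.split₀ caption).length < 3 then false
  else if pvProblematicTerms.any
      (fun term => PySem.Str.isIn (PySem.Str.lower term) (PySem.Str.lower caption)) then false
  else true

-- ===== PORT B =====
-- the same term list, as lowered character lists (the literals are already lowercase)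
def pvTermsB : List (List Char) := pvProblematicTerms.map (fun t => t.toList)

-- one pass over the positions of the lowered caption: at each suffix, does any term start here?
def pvScan : List Char → Bool
  | [] => false
  | c :: rest =>
      (pvTermsB.any (fun term => PySem.Chars.startswith (c :: rest) term)) || pvScan rest

def filter_good_captions_alt (caption : String) : Bool :=
  if (PySem.Str.split₀ caption).length < 3 then false
  else if pvScan (PySem.Chars.lower caption.toList) then false
  else true

-- ===== PRECONDITION & SPEC =====
def Spec_filter_good_captions (caption : String) (out : Bool) : Prop := out = filter_good_captions_alt caption
instance (caption : String) (out : Bool) : Decidable (Spec_filter_good_captions caption out) := by unfold Spec_filter_good_captions; infer_instance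

-- ===== CLAIM (what is proved, stated in full; the proofs are below) =====
def Claim_equal_filter_good_captions : Prop := ∀ (caption : String), Dom_filter_good_captions caption → Spec_filter_good_captions caption (filter_good_captions caption)

-- ===== LEMMAS AND PROOFS =====

-- every problematic term is nonempty
lemma pvTermsB_ne_nil : ∀ t ∈ pvTermsB, t ≠ [] := by decide

-- the scan finds exactly the suffix positions where some term is a prefix, i.e. infix occurrences
lemma pvScan_iff (s : List Char) : pvScan s = true ↔ ∃ t ∈ pvTermsB, t <:+: s := by
  induction s with
  | nil =>
      simp only [pvScan, Bool.false_eq_true, false_iff, not_exists]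
      rintro t ⟨ht, hinf⟩
      exact pvTermsB_ne_nil t ht (List.eq_nil_of_infix_nil hinf)
  | cons c rest ih =>
      simp only [pvScan, Bool.or_eq_true, List.any_eq_true, ih,
        PySem.Chars.startswith_iff, List.infix_cons_iff]
      constructor
      · rintro (⟨t, ht, h⟩ | ⟨t, ht, h⟩) <;> exact ⟨t, ht, by tauto⟩
      · rintro ⟨t, ht, h | h⟩
        · exact Or.inl ⟨t, ht, h⟩
        · exact Or.inr ⟨t, ht, h⟩

-- lowering the (already lowercase) term literals is the identity
lemma pvTerms_lower : pvProblematicTerms.map (fun t => PySem.Chars.lower t.toList) = pvTermsB := by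
  decide

-- A's any-of-`in` test equals B's single scan of the lowered caption
lemma pvAny_eq_scan (caption : String) :
    pvProblematicTerms.any
      (fun term => PySem.Str.isIn (PySem.Str.lower term) (PySem.Str.lower caption))
      = pvScan (PySem.Chars.lower caption.toList) := by
  rw [Bool.eq_iff_iff, pvScan_iff]
  simp only [List.any_eq_true, PySem.Str.isIn_iff_infix, PySem.Str.toList_lower]
  constructor
  · rintro ⟨term, hmem, hinf⟩
    refine ⟨PySem.Chars.lower term.toList, ?_, hinf⟩
    rw [← pvTerms_lower]
    exact List.mem_map_of_mem hmem
  · rintro ⟨t, hmem, hinf⟩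
    rw [← pvTerms_lower, List.mem_map] at hmem
    obtain ⟨term, hmem, rfl⟩ := hmem
    exact ⟨term, hmem, hinf⟩

-- ===== VERDICT (by name: the statement is the Claim_ definition above) =====
theorem filter_good_captions_spec : Claim_equal_filter_good_captions := by
  intro caption _
  unfold Spec_filter_good_captions filter_good_captions filter_good_captions_alt
  rw [pvAny_eq_scan]
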